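-- pv_equiv track=rewrite | github.com/uf-icbr-bioinformatics/csvutils | colx.py | decodeBitmask
-- ===== SOURCE A (Python) =====
-- def decodeBitmask(map, value, sep='|'):
--     result = []
--     x = 1
--     while x <= value:
--         if value & x > 0:
--             result.append(map[x])
--         x = x * 2
--     return sep.join(result)
-- ===== SOURCE B (Python) =====
-- def decodeBitmask(map, value, sep='|'):
--     def bits(v, w):
--         if v <= 0:
--             return []
--         if v & 1:
--             return [map[w]] + bits(v // 2, w * 2)
--         return bits(v // 2, w * 2)
--     return sep.join(bits(value, 1))
-- ===== Notes on version B (the rewrite author's own statement) =====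
-- stated objective: alternative
-- what changed: Replaces A's iterative doubling probe with an accumulator by a recursive decomposition: shift value right each step, test the low bit with v & 1, and build the result list by cons/concatenation; same keys visited in the same increasing order.
import Mathlib
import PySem

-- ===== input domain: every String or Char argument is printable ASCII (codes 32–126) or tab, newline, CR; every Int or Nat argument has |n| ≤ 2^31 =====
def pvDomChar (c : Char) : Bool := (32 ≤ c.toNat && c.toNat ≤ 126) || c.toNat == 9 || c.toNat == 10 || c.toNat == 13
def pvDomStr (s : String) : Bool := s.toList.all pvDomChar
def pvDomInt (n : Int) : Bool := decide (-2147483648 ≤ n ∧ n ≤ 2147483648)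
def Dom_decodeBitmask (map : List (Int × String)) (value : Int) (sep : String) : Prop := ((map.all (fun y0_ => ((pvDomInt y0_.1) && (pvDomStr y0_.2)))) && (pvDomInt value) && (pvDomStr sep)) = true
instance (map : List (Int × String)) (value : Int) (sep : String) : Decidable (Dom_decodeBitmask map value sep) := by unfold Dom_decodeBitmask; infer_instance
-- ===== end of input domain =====

-- B replaces A's iterative doubling probe (x = 1,2,4,… with an accumulator) by a recursive
-- decomposition: shift value right each step, test the low bit, build the list by cons
-- (objective: alternative). The dict is an association list; map[x] is first-match lookup,
-- its KeyError case is excluded by Pre_.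

-- ===== PORT A =====
-- dict lookup map[x]; the default "" is only reached on a KeyError, which Pre_ excludes
def pvLookup (map : List (Int × String)) (x : Int) : String := (List.lookup x map).getD ""

-- while x <= value: if value & x > 0: result.append(map[x]); x = x * 2
-- (fuel is a totality guard only: x doubles from 1, so (value+1).toNat iterations always suffice)
def pvLoopA (map : List (Int × String)) (value : Int) : Nat → Int → List String → List String
  | 0, _, result => result
  | fuel+1, x, result =>
    if x ≤ value then
      pvLoopA map value fuel (x * 2)
        (if PySem.Int.band value x > 0 then result ++ [pvLookup map x] else result)
    else result

def decodeBitmask (map : List (Int × String)) (value : Int) (sep : String) : String :=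
  PySem.Str.join sep (pvLoopA map value (value + 1).toNat 1 [])

-- ===== PORT B =====
-- def bits(v, w): if v <= 0: []; if v & 1: [map[w]] + bits(v // 2, 2*w); else bits(v // 2, 2*w)
def pvBitsB (map : List (Int × String)) (v w : Int) : List String :=
  if h : v ≤ 0 then []
  else if PySem.Int.band v 1 ≠ 0 then
    [(List.lookup w map).getD ""] ++ pvBitsB map (PySem.Int.floordiv v 2) (w * 2)
  else
    pvBitsB map (PySem.Int.floordiv v 2) (w * 2)
termination_by v.toNat
decreasing_by
  all_goals
    rw [PySem.Int.floordiv_eq_ediv_of_pos (by omega)]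
    omega

def decodeBitmask_alt (map : List (Int × String)) (value : Int) (sep : String) : String :=
  PySem.Str.join sep (pvBitsB map value 1)

-- ===== PRECONDITION & SPEC =====
-- Pre_ excludes exactly the inputs on which Python A raises KeyError: some power of two
-- 2^i ≤ value with bit i set in value whose key 2^i is absent from the dict.
def Pre_decodeBitmask (map : List (Int × String)) (value : Int) (sep : String) : Prop :=
  ∀ i ∈ List.range 32, ((2^i : Int) ≤ value ∧ 0 < PySem.Int.band value (2^i)) →
    (List.lookup ((2^i : Nat) : Int) map).isSome = true
instance (map : List (Int × String)) (value : Int) (sep : String) : Decidable (Pre_decodeBitmask map value sep) := by unfold Pre_decodeBitmask; infer_instance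

def pvWitness_decodeBitmask : (List (Int × String)) × Int × String := ([(1, "a"), (2, "b")], 3, "|")

def Spec_decodeBitmask (map : List (Int × String)) (value : Int) (sep : String) (out : String) : Prop := out = decodeBitmask_alt map value sep
instance (map : List (Int × String)) (value : Int) (sep : String) (out : String) : Decidable (Spec_decodeBitmask map value sep out) := by unfold Spec_decodeBitmask; infer_instance

-- ===== CLAIM (what is proved, stated in full; the proofs are below) =====
def Claim_equal_decodeBitmask : Prop := ∀ (map : List (Int × String)) (value : Int) (sep : String), Dom_decodeBitmask map value sep → Pre_decodeBitmask map value sep → Spec_decodeBitmask map value sep (decodeBitmask map value sep)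

-- ===== LEMMAS AND PROOFS =====

theorem pvAndTwoMul (n x : Nat) : n &&& (2*x) = 2*((n/2) &&& x) := by
  apply Nat.eq_of_testBit_eq; intro i
  have e : ∀ c : Nat, 2*c/2 = c := fun c => by omega
  cases i with
  | zero =>
      rw [Nat.testBit_land]
      simp only [Nat.testBit_zero]
      have h2 : (2*x) % 2 = 0 := by omega
      have h3 : (2*((n/2) &&& x)) % 2 = 0 := by omega
      simp [h2, h3]
  | succ i =>
      rw [Nat.testBit_land]; simp only [Nat.testBit_succ]; rw [e, e,
          Nat.testBit_land]

-- key sequences produced by the two programs, at the level of Nat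
def pvKeysA (n x : Nat) : List Nat :=
  if _h : 0 < x ∧ x ≤ n then (if n &&& x ≠ 0 then [x] else []) ++ pvKeysA n (2*x) else []
termination_by n + 1 - x
decreasing_by omega

def pvKeysC (n w : Nat) : List Nat :=
  if _h : 0 < n then
    (if n % 2 = 1 then [w] else []) ++ pvKeysC (n/2) (2*w)
  else []
termination_by n
decreasing_by omega

theorem pvKeysA_double (n : Nat) : ∀ x, pvKeysA n (2*x) = (pvKeysA (n/2) x).map (2*·) := by
  have H : ∀ k x, n/2 + 1 - x ≤ k → pvKeysA n (2*x) = (pvKeysA (n/2) x).map (2*·) := by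
    intro k
    induction k with
    | zero =>
        intro x hx
        conv_lhs => rw [pvKeysA]
        conv_rhs => rw [pvKeysA]
        rw [dif_neg (by omega), dif_neg (by omega)]
        simp
    | succ k IH =>
        intro x hx
        by_cases hg : 0 < x ∧ x ≤ n/2
        · conv_lhs => rw [pvKeysA]
          conv_rhs => rw [pvKeysA]
          rw [dif_pos (by omega : 0 < 2*x ∧ 2*x ≤ n), dif_pos hg]
          have hand : n &&& 2*x = 2*((n/2) &&& x) := pvAndTwoMul n x
          rw [List.map_append]
          congr 1
          · by_cases hb : (n/2) &&& x ≠ 0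
            · rw [if_pos (by omega), if_pos hb]; simp
            · rw [if_neg (by omega), if_neg hb]; simp
          · exact IH (2*x) (by omega)
        · conv_lhs => rw [pvKeysA]
          conv_rhs => rw [pvKeysA]
          rw [dif_neg (by omega), dif_neg hg]
          simp
  exact fun x => H _ x le_rfl

theorem pvKeysC_double (n : Nat) : ∀ w, pvKeysC n (2*w) = (pvKeysC n w).map (2*·) := by
  induction n using Nat.strong_induction_on with
  | _ n IH =>
    intro w
    by_cases hn : 0 < n
    · conv_lhs => rw [pvKeysC]
      conv_rhs => rw [pvKeysC]
      rw [dif_pos hn, dif_pos hn, List.map_append]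
      congr 1
      · by_cases hp : n % 2 = 1
        · rw [if_pos hp, if_pos hp]; simp
        · rw [if_neg hp, if_neg hp]; simp
      · exact IH (n/2) (by omega) (2*w)
    · conv_lhs => rw [pvKeysC]
      conv_rhs => rw [pvKeysC]
      rw [dif_neg hn, dif_neg hn]
      simp

theorem pvKeysAC : ∀ n, pvKeysA n 1 = pvKeysC n 1 := by
  intro n
  induction n using Nat.strong_induction_on with
  | _ n IH =>
    by_cases hn : 0 < n
    · conv_lhs => rw [pvKeysA]
      conv_rhs => rw [pvKeysC]
      rw [dif_pos (by omega : 0 < 1 ∧ 1 ≤ n), dif_pos hn]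
      have hb : n &&& 1 = n % 2 := Nat.and_one_is_mod n
      congr 1
      · by_cases hp : n % 2 = 1
        · rw [if_pos (by omega), if_pos hp]
        · rw [if_neg (by simp [hb]; omega), if_neg hp]
      · rw [show (2:Nat)*1 = 2*1 from rfl, pvKeysA_double, IH (n/2) (by omega),
            pvKeysC_double]
    · have hn0 : n = 0 := by omega
      subst hn0
      conv_lhs => rw [pvKeysA]
      conv_rhs => rw [pvKeysC]
      simp

-- bridge from A's Int loop to its Nat key sequence
theorem pvLoopA_keys (map : List (Int × String)) (n : Nat) :
    ∀ (fuel y : Nat) acc, 0 < y → n + 1 - y ≤ fuel →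
      pvLoopA map (n : Int) fuel ((y : Nat) : Int) acc
        = acc ++ (pvKeysA n y).map (fun k => pvLookup map (k : Int)) := by
  intro fuel
  induction fuel with
  | zero =>
      intro y acc hy hf
      rw [pvLoopA, pvKeysA, dif_neg (by omega)]
      simp
  | succ fuel IH =>
      intro y acc hy hf
      by_cases hg : y ≤ n
      · rw [pvLoopA, if_pos (by exact_mod_cast hg), pvKeysA, dif_pos (by omega)]
        have hband : PySem.Int.band (n : Int) (y : Int) = ((n &&& y : Nat) : Int) :=
          PySem.Int.band_natCast n y
        have hcast : ((y : Nat) : Int) * 2 = ((2*y : Nat) : Int) := by push_cast; ring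
        rw [hband, hcast, IH (2*y) _ (by omega) (by omega)]
        by_cases hb : n &&& y ≠ 0
        · rw [if_pos (by omega), if_pos hb]
          simp
        · rw [if_neg (by omega), if_neg hb]
          simp
      · rw [pvLoopA, if_neg (by exact_mod_cast hg), pvKeysA, dif_neg (by omega)]
        simp

-- bridge from B's Int recursion to its Nat key sequence
theorem pvBitsB_keys (map : List (Int × String)) :
    ∀ (n w : Nat), 0 < w →
      pvBitsB map (n : Int) ((w : Nat) : Int)
        = (pvKeysC n w).map (fun k => pvLookup map (k : Int)) := by
  intro n
  induction n using Nat.strong_induction_on with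
  | _ n IH =>
    intro w hw
    by_cases hn : 0 < n
    · rw [pvBitsB, dif_neg (by exact_mod_cast by omega : ¬ ((n:Int) ≤ 0)), pvKeysC, dif_pos hn]
      have hband : PySem.Int.band (n : Int) 1 = ((n &&& 1 : Nat) : Int) := by
        exact_mod_cast PySem.Int.band_natCast n 1
      have hdiv : PySem.Int.floordiv (n : Int) 2 = ((n / 2 : Nat) : Int) := by
        exact_mod_cast PySem.Int.floordiv_natCast n 2
      have hw2 : ((w : Nat) : Int) * 2 = ((2*w : Nat) : Int) := by push_cast; ring
      have hb : n &&& 1 = n % 2 := Nat.and_one_is_mod n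
      rw [hband, hdiv, hw2, IH (n/2) (by omega) (2*w) (by omega)]
      by_cases hp : n % 2 = 1
      · simp [hb, hp, pvLookup]
      · have hp0 : n % 2 = 0 := by omega
        simp [hb, hp0, pvLookup]
    · have hn0 : n = 0 := by omega
      subst hn0
      rw [pvBitsB, pvKeysC]
      simp

theorem pvPrograms_eq (map : List (Int × String)) (value : Int) :
    pvLoopA map value (value + 1).toNat 1 [] = pvBitsB map value 1 := by
  by_cases hv : 0 ≤ value
  · obtain ⟨n, rfl⟩ : ∃ n : Nat, value = (n : Int) := ⟨value.toNat, by omega⟩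
    have hf1 : ((n : Int) + 1).toNat = n + 1 := by omega
    have h1 : (1 : Int) = ((1 : Nat) : Int) := by norm_num
    rw [hf1, h1, pvLoopA_keys map n (n+1) 1 [] (by omega) (by omega),
        pvBitsB_keys map n 1 (by omega), pvKeysAC n]
    simp
  · have hf1 : (value + 1).toNat = 0 := by omega
    rw [hf1, pvLoopA, pvBitsB, dif_pos (by omega)]

-- ===== VERDICT (by name: the statement is the Claim_ definition above) =====
theorem decodeBitmask_spec : Claim_equal_decodeBitmask := by
  intro map value sep _hdom _hpre
  unfold Spec_decodeBitmask decodeBitmask decodeBitmask_alt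
  rw [pvPrograms_eq]
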